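-- pv_equiv track=rewrite | github.com/craigholland/context-atlas | src/context_atlas/domain/policies/deduplication.py | _trim_shared_leading_prefix
-- ===== SOURCE A (Python) =====
-- _MAX_SHARED_PREFIX_LINES = 6
--
-- _MAX_SHARED_PREFIX_CHARS = 240
--
-- _MIN_SHARED_PREFIX_LINES = 2
--
-- _MIN_REMAINING_LINES_AFTER_PREFIX = 2
--
-- def _trim_shared_leading_prefix(
--     left_lines: tuple[str, ...],
--     right_lines: tuple[str, ...],
-- ) -> tuple[tuple[str, ...], tuple[str, ...]]:
--     """Discount a bounded shared leading line prefix before fuzzy comparison."""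
--
--     shared_line_count = 0
--     shared_char_count = 0
--
--     for left_line, right_line in zip(left_lines, right_lines):
--         if left_line != right_line:
--             break
--         if shared_line_count >= _MAX_SHARED_PREFIX_LINES:
--             break
--         prospective_char_count = shared_char_count + len(left_line)
--         if prospective_char_count > _MAX_SHARED_PREFIX_CHARS:
--             break
--         shared_line_count += 1
--         shared_char_count = prospective_char_count
--
--     if shared_line_count < _MIN_SHARED_PREFIX_LINES:
--         return left_lines, right_lines
--
--     trimmed_left_lines = left_lines[shared_line_count:]
--     trimmed_right_lines = right_lines[shared_line_count:]
--     if (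
--         len(trimmed_left_lines) < _MIN_REMAINING_LINES_AFTER_PREFIX
--         or len(trimmed_right_lines) < _MIN_REMAINING_LINES_AFTER_PREFIX
--     ):
--         return left_lines, right_lines
--     return trimmed_left_lines, trimmed_right_lines
-- ===== SOURCE B (Python) =====
-- _MAX_SHARED_PREFIX_LINES = 6
--
-- _MAX_SHARED_PREFIX_CHARS = 240
--
-- _MIN_SHARED_PREFIX_LINES = 2
--
-- _MIN_REMAINING_LINES_AFTER_PREFIX = 2
--
-- def _trim_shared_leading_prefix(
--     left_lines,
--     right_lines,
-- ):
--     """Declarative restatement: count the leading pair indices whose whole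
--     prefix is line-for-line equal and fits the char budget, then trim."""
--     pairs = list(zip(left_lines, right_lines))[:_MAX_SHARED_PREFIX_LINES]
--     shared = sum(
--         1
--         for k in range(len(pairs))
--         if all(l == r for l, r in pairs[: k + 1])
--         and sum(len(l) for l, _ in pairs[: k + 1]) <= _MAX_SHARED_PREFIX_CHARS
--     )
--     if shared < _MIN_SHARED_PREFIX_LINES:
--         return left_lines, right_lines
--     if (
--         len(left_lines) - shared < _MIN_REMAINING_LINES_AFTER_PREFIX
--         or len(right_lines) - shared < _MIN_REMAINING_LINES_AFTER_PREFIX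
--     ):
--         return left_lines, right_lines
--     return left_lines[shared:], right_lines[shared:]
-- ===== Notes on version B (the rewrite author's own statement) =====
-- stated objective: alternative
-- what changed: Replaces A's stateful break-loop (running line/char counters over zip) by a declarative count: take the first 6 zipped pairs and count the indices whose entire prefix is line-for-line equal and whose cumulative character length fits the 240-char budget, then apply the trim guards on lengths.
import Mathlib
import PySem

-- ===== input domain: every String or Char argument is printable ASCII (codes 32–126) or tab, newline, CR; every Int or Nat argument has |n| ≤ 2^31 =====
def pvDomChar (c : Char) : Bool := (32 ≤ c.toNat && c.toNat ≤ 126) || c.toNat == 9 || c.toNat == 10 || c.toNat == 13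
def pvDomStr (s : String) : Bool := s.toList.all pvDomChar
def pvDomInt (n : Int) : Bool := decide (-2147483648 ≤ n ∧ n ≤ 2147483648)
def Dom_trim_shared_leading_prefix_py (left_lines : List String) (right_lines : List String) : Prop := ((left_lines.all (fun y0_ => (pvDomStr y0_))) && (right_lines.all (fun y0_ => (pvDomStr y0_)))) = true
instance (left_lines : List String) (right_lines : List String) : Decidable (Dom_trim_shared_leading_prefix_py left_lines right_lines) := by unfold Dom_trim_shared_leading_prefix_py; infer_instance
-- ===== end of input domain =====

-- B replaces A's stateful break-loop by a declarative count of the prefix indices passing both caps (alternative decomposition).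

-- ===== PORT A =====
-- the for-loop over zip(left_lines, right_lines) with its three breaks, as structural recursion over the same state
def pvALoop : List (String × String) → Nat → Int → Nat
  | [], cnt, _ => cnt
  | (l, r) :: rest, cnt, chars =>
    if l != r then cnt
    else if 6 ≤ cnt then cnt
    else
      let pros := chars + PySem.Str.len l
      if 240 < pros then cnt
      else pvALoop rest (cnt + 1) pros

def trim_shared_leading_prefix_py (left_lines : List String) (right_lines : List String) : List String × List String :=
  let n := pvALoop (left_lines.zip right_lines) 0 0
  if n < 2 then (left_lines, right_lines)
  else
    let tl := PySem.List.slice left_lines (some (n : Int)) none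
    let tr := PySem.List.slice right_lines (some (n : Int)) none
    if tl.length < 2 || tr.length < 2 then (left_lines, right_lines)
    else (tl, tr)

-- ===== PORT B =====
def trim_shared_leading_prefix_py_alt (left_lines : List String) (right_lines : List String) : List String × List String :=
  let pairs := (left_lines.zip right_lines).take 6
  let shared := (List.range pairs.length).countP (fun k =>
      (pairs.take (k+1)).all (fun p => p.1 == p.2) &&
      decide (((pairs.take (k+1)).map (fun p => PySem.Str.len p.1)).sum ≤ 240))
  if shared < 2 then (left_lines, right_lines)
  else if left_lines.length - shared < 2 || right_lines.length - shared < 2 then (left_lines, right_lines)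
  else (left_lines.drop shared, right_lines.drop shared)

-- ===== PRECONDITION & SPEC =====
def Spec_trim_shared_leading_prefix_py (left_lines : List String) (right_lines : List String) (out : List String × List String) : Prop := out = trim_shared_leading_prefix_py_alt left_lines right_lines
instance (left_lines : List String) (right_lines : List String) (out : List String × List String) : Decidable (Spec_trim_shared_leading_prefix_py left_lines right_lines out) := by unfold Spec_trim_shared_leading_prefix_py; infer_instance

-- ===== CLAIM (what is proved, stated in full; the proofs are below) =====
def Claim_equal_trim_shared_leading_prefix_py : Prop := ∀ (left_lines : List String) (right_lines : List String), Dom_trim_shared_leading_prefix_py left_lines right_lines → Spec_trim_shared_leading_prefix_py left_lines right_lines (trim_shared_leading_prefix_py left_lines right_lines)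

-- ===== LEMMAS AND PROOFS =====

-- canonical greedy count: number of leading lens that fit lim lines and the 240-char budget starting from chars
def pvG : List Int → Nat → Int → Nat
  | [], _, _ => 0
  | x :: xs, lim, chars =>
    match lim with
    | 0 => 0
    | m + 1 => if 240 < chars + x then 0 else 1 + pvG xs m (chars + x)

theorem pvALoop_eq_pvG : ∀ (ps : List (String × String)) (cnt : Nat) (chars : Int),
    pvALoop ps cnt chars =
      cnt + pvG ((ps.takeWhile (fun p => p.1 == p.2)).map (fun p => PySem.Str.len p.1)) (6 - cnt) chars := by
  intro ps
  induction ps with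
  | nil => intro cnt chars; simp [pvALoop, pvG]
  | cons hd tl ih =>
    intro cnt chars
    obtain ⟨l, r⟩ := hd
    by_cases hlr : l == r
    · have hne : (l != r) = false := by simp [bne, hlr]
      by_cases hc : 6 ≤ cnt
      · have h6 : 6 - cnt = 0 := by omega
        simp [pvALoop, hne, hc, h6, hlr, pvG]
      · have h6 : 6 - cnt = (6 - (cnt + 1)) + 1 := by omega
        simp only [pvALoop, hne, Bool.false_eq_true, if_false, if_neg hc,
          List.takeWhile_cons, hlr, if_pos, List.map_cons, h6, pvG]
        split_ifs with hch
        · simp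
        · rw [ih (cnt + 1) (chars + PySem.Str.len l)]
          omega
    · have hne : (l != r) = true := by simp [bne, hlr]
      simp [pvALoop, hne, List.takeWhile_cons, hlr, pvG]

theorem pvG_take : ∀ (xs : List Int) (lim : Nat) (chars : Int),
    pvG xs lim chars = pvG (xs.take lim) lim chars := by
  intro xs
  induction xs with
  | nil => intro lim chars; simp
  | cons x xs ih =>
    intro lim chars
    cases lim with
    | zero => simp [pvG]
    | succ m =>
      simp only [List.take_succ_cons, pvG]
      rw [ih m]

theorem pvG_eq_countP : ∀ (xs : List Int), (∀ x ∈ xs, 0 ≤ x) → ∀ (lim : Nat) (chars : Int),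
    pvG xs lim chars =
      (List.range (min xs.length lim)).countP
        (fun k => decide (chars + ((xs.take (k+1)).sum) ≤ 240)) := by
  intro xs
  induction xs with
  | nil => intro _ lim chars; simp [pvG]
  | cons x xs ih =>
    intro hnn lim chars
    have hx : 0 ≤ x := hnn x (by simp)
    have hxs : ∀ y ∈ xs, 0 ≤ y := fun y hy => hnn y (by simp [hy])
    cases lim with
    | zero => simp [pvG]
    | succ m =>
      have hmin : min (x :: xs).length (m + 1) = (min xs.length m) + 1 := by
        simp only [List.length_cons]; omega
      rw [hmin, List.range_succ_eq_map]
      simp only [List.countP_cons, List.countP_map]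
      by_cases hch : 240 < chars + x
      · have hhead : (decide (chars + (((x :: xs).take (0+1)).sum) ≤ 240)) = false := by
          simp; omega
        have htail : (List.range (min xs.length m)).countP
            ((fun k => decide (chars + (((x :: xs).take (k+1)).sum) ≤ 240)) ∘ Nat.succ) = 0 := by
          rw [List.countP_eq_zero]
          intro k _
          have hs : 0 ≤ (xs.take (k+1)).sum :=
            List.sum_nonneg (fun y hy => hxs y (List.mem_of_mem_take hy))
          simp [List.take_succ_cons]
          omega
        simp only [pvG, if_pos hch, htail, hhead]
        simp
      · have hhead : (decide (chars + (((x :: xs).take (0+1)).sum) ≤ 240)) = true := by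
          simp; omega
        have htail : (List.range (min xs.length m)).countP
            ((fun k => decide (chars + (((x :: xs).take (k+1)).sum) ≤ 240)) ∘ Nat.succ) =
            (List.range (min xs.length m)).countP
            (fun k => decide ((chars + x) + ((xs.take (k+1)).sum) ≤ 240)) := by
          apply List.countP_congr
          intro k _
          simp [List.take_succ_cons]
          constructor <;> (intro; omega)
        simp only [pvG, if_neg hch, htail, hhead, ← ih hxs m (chars + x)]
        simp; omega

-- take n commutes with takeWhile
theorem takeWhile_take {α : Type} (p : α → Bool) : ∀ (l : List α) (n : Nat),
    (l.take n).takeWhile p = (l.takeWhile p).take n := by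
  intro l
  induction l with
  | nil => intro n; simp
  | cons x xs ih =>
    intro n
    cases n with
    | zero => simp [List.takeWhile]
    | succ m =>
      by_cases hx : p x
      · simp [List.take_succ_cons, List.takeWhile_cons, hx, ih m]
      · simp [List.take_succ_cons, List.takeWhile_cons, hx]

-- a prefix long enough determines take
theorem take_of_prefix {α : Type} {l₁ l₂ : List α} (h : l₁ <+: l₂) {m : Nat} (hm : m ≤ l₁.length) :
    l₂.take m = l₁.take m := by
  obtain ⟨s, rfl⟩ := h
  exact List.take_append_of_le_length hm

-- the element right after the takeWhile prefix fails the predicate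
theorem takeWhile_stop {α : Type} (p : α → Bool) : ∀ (l : List α) (x : α),
    l[(l.takeWhile p).length]? = some x → p x = false := by
  intro l
  induction l with
  | nil => intro x hx; simp at hx
  | cons y ys ih =>
    intro x hx
    by_cases hy : p y
    · rw [List.takeWhile_cons_of_pos hy, List.length_cons, List.getElem?_cons_succ] at hx
      exact ih x hx
    · rw [List.takeWhile_cons_of_neg hy, List.length_nil, List.getElem?_cons_zero] at hx
      cases hx
      exact Bool.eq_false_iff.mpr hy

-- counting a predicate that is accurate below t and false from t on
theorem countP_range_split (t : Nat) (g : Nat → Bool) : ∀ (n : Nat) (f : Nat → Bool), t ≤ n →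
    (∀ k, k < t → f k = g k) → (∀ k, t ≤ k → k < n → f k = false) →
    (List.range n).countP f = (List.range t).countP g := by
  intro n
  induction n with
  | zero =>
    intro f hn hlow _
    have : t = 0 := by omega
    subst this
    rfl
  | succ m ih =>
    intro f hn hlow hhigh
    by_cases hm : t ≤ m
    · rw [List.range_succ, List.countP_append]
      have : f m = false := hhigh m hm (by omega)
      simp [this, ih f hm hlow (fun k hk hkm => hhigh k hk (by omega))]
    · have : t = m + 1 := by omega
      subst this
      apply List.countP_congr
      intro k hk
      simp only [List.mem_range] at hk
      rw [hlow k hk]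

theorem shared_counts_eq (L R : List String) :
    pvALoop (L.zip R) 0 0 =
      (List.range ((L.zip R).take 6).length).countP (fun k =>
        (((L.zip R).take 6).take (k+1)).all (fun p => p.1 == p.2) &&
        decide (((((L.zip R).take 6).take (k+1)).map (fun p => PySem.Str.len p.1)).sum ≤ 240)) := by
  set Z := L.zip R with hZ
  set pairs := Z.take 6 with hpairs
  set q : String × String → Bool := fun p => p.1 == p.2 with hq
  set tw := pairs.takeWhile q with htw
  set msL := tw.map (fun p => PySem.Str.len p.1) with hmsL
  -- A's loop equals pvG on msL
  have hA : pvALoop Z 0 0 = pvG msL 6 0 := by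
    rw [pvALoop_eq_pvG Z 0 0]
    simp only [Nat.zero_add, Nat.sub_zero]
    rw [pvG_take, hmsL, htw, hpairs, takeWhile_take, ← List.map_take]
  -- pvG equals the countP over msL partial sums
  have hnn : ∀ x ∈ msL, 0 ≤ x := by
    intro x hx
    rw [hmsL] at hx
    obtain ⟨p, _, rfl⟩ := List.mem_map.mp hx
    rw [PySem.Str.len_eq]
    positivity
  have hmsL6 : msL.length ≤ 6 := by
    have h1 : tw.length ≤ pairs.length := (List.takeWhile_prefix q).length_le
    have h2 : pairs.length ≤ 6 := by simp [hpairs]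
    simp [hmsL]; omega
  have hG : pvG msL 6 0 = (List.range msL.length).countP
      (fun k => decide (((msL.take (k+1)).sum) ≤ 240)) := by
    rw [pvG_eq_countP msL hnn 6 0]
    have : min msL.length 6 = msL.length := by omega
    rw [this]
    apply List.countP_congr
    intro k _
    simp
  rw [hA, hG]
  -- bridge B's countP over range pairs.length to the countP over range msL.length
  have hml : msL.length = tw.length := by simp [hmsL]
  have htle : tw.length ≤ pairs.length := (List.takeWhile_prefix q).length_le
  symm
  apply countP_range_split
  · omega
  · -- below tw.length the two predicates agree
    intro k hk
    rw [hml] at hk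
    have hktw : k + 1 ≤ tw.length := hk
    have htake : pairs.take (k+1) = tw.take (k+1) :=
      take_of_prefix (List.takeWhile_prefix q) hktw
    have hall : (pairs.take (k+1)).all q = true := by
      rw [htake, List.all_eq_true]
      intro p hp
      exact List.mem_takeWhile_imp (List.mem_of_mem_take hp)
    rw [hall]
    simp only [Bool.true_and]
    congr 1
    rw [htake, hmsL, List.map_take]
  · -- from tw.length on, the all-equal conjunct is false
    intro k hk hkn
    rw [hml] at hk
    have hlt : tw.length < pairs.length := by omega
    have hfail : q (pairs[tw.length]'hlt) = false := by
      apply takeWhile_stop q pairs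
      rw [← htw]
      exact List.getElem?_eq_getElem hlt
    have hmem : pairs[tw.length]'hlt ∈ pairs.take (k+1) := by
      have hlen : tw.length < (pairs.take (k+1)).length := by
        simp [List.length_take]
        omega
      have : (pairs.take (k+1))[tw.length]'hlen = pairs[tw.length]'hlt := List.getElem_take
      rw [← this]
      exact List.getElem_mem hlen
    have : (pairs.take (k+1)).all q = false := by
      rw [Bool.eq_false_iff]
      intro hall
      rw [List.all_eq_true] at hall
      have := hall _ hmem
      rw [hfail] at this
      exact Bool.false_ne_true this
    rw [this, Bool.false_and]

-- ===== VERDICT (by name: the statement is the Claim_ definition above) =====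
theorem trim_shared_leading_prefix_py_spec : Claim_equal_trim_shared_leading_prefix_py := by
  intro L R _
  unfold Spec_trim_shared_leading_prefix_py trim_shared_leading_prefix_py trim_shared_leading_prefix_py_alt
  rw [shared_counts_eq L R]
  set n := (List.range ((L.zip R).take 6).length).countP (fun k =>
        (((L.zip R).take 6).take (k+1)).all (fun p => p.1 == p.2) &&
        decide (((((L.zip R).take 6).take (k+1)).map (fun p => PySem.Str.len p.1)).sum ≤ 240)) with hn
  simp only [PySem.List.slice_from_natCast, List.length_drop]
  rfl
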